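-- pv_equiv track=rewrite | github.com/mikiships/coderace | scripts/format-review-comment.py | format_cross_review_section
-- ===== SOURCE A (Python) =====
-- SEVERITY_ORDER = ["critical", "error", "warning", "info", "suggestion"]
--
-- SEVERITY_EMOJI = {
--     "critical": "🔴",
--     "error": "🟠",
--     "warning": "🟡",
--     "info": "🔵",
--     "suggestion": "⚪",
-- }
--
-- def _display(value: str) -> str:
--     """Convert kebab-case to Title Case for display."""
--     return value.replace("-", " ").title()
--
-- def format_cross_review_section(data: dict) -> str:
--     """Build the Phase 2 cross-review section."""
--     p2 = data.get("phase2_findings", [])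
--     if not p2:
--         return ""
--
--     # Group by agent
--     agents_ordered: list[str] = []
--     seen: set[str] = set()
--     for f in p2:
--         agent = f.get("agent", "")
--         if agent not in seen:
--             agents_ordered.append(agent)
--             seen.add(agent)
--
--     lines = ["## Phase 2: Cross-Review Synthesis\n"]
--     for agent in agents_ordered:
--         agent_findings = [f for f in p2 if f.get("agent") == agent]
--         lines.append(f"### {agent}")
--         for sev in SEVERITY_ORDER:
--             grouped = [f for f in agent_findings if f.get("severity") == sev]
--             if not grouped:
--                 continue
--             emoji = SEVERITY_EMOJI.get(sev, "")
--             lines.append(f"**{emoji} {_display(sev)}**")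
--             for f in grouped:
--                 loc = f.get("location") or ""
--                 finding = f.get("finding", "")
--                 if loc:
--                     lines.append(f"- `{loc}` — {finding}")
--                 else:
--                     lines.append(f"- {finding}")
--             lines.append("")
--
--     return "\n".join(lines)
-- ===== SOURCE B (Python) =====
-- SEVERITY_ORDER = ["critical", "error", "warning", "info", "suggestion"]
--
-- SEVERITY_EMOJI = {
--     "critical": "🔴",
--     "error": "🟠",
--     "warning": "🟡",
--     "info": "🔵",
--     "suggestion": "⚪",
-- }
--
-- def _display(value: str) -> str:
--     """Convert kebab-case to Title Case for display."""
--     return value.replace("-", " ").title()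
--
-- def format_cross_review_section(data: dict) -> str:
--     """Build the Phase 2 cross-review section (single-pass index, no rescans)."""
--     p2 = data.get("phase2_findings", [])
--     if not p2:
--         return ""
--     # display order of agent sections: first appearance of each display name
--     agents = list(dict.fromkeys(f.get("agent", "") for f in p2))
--     # one flat index keyed by (raw agent value, severity); built in one pass over p2
--     pairs = []
--     for f in p2:
--         sev = f.get("severity")
--         if sev in SEVERITY_EMOJI:
--             loc = f.get("location") or ""
--             finding = f.get("finding", "")
--             line = f"- `{loc}` — {finding}" if loc else f"- {finding}"
--             pairs.append(((f.get("agent"), sev), line))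
--     groups = {}
--     for key, line in pairs:
--         groups.setdefault(key, []).append(line)
--     lines = ["## Phase 2: Cross-Review Synthesis\n"]
--     for agent in agents:
--         lines.append(f"### {agent}")
--         for sev in SEVERITY_ORDER:
--             block = groups.get((agent, sev), [])
--             if block:
--                 lines.append(f"**{SEVERITY_EMOJI[sev]} {_display(sev)}**")
--                 lines.extend(block)
--                 lines.append("")
--     return "\n".join(lines)
-- ===== Notes on version B (the rewrite author's own statement) =====
-- stated objective: alternative
-- what changed: B builds, in a single pass over the findings, an ordered dedup of agent names and one flat dict keyed by (raw agent value, severity) holding the already-formatted lines, then emits sections by direct lookup, replacing A's seen-set loop plus per-agent rescan of the whole list and per-severity nested filter.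
import Mathlib
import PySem

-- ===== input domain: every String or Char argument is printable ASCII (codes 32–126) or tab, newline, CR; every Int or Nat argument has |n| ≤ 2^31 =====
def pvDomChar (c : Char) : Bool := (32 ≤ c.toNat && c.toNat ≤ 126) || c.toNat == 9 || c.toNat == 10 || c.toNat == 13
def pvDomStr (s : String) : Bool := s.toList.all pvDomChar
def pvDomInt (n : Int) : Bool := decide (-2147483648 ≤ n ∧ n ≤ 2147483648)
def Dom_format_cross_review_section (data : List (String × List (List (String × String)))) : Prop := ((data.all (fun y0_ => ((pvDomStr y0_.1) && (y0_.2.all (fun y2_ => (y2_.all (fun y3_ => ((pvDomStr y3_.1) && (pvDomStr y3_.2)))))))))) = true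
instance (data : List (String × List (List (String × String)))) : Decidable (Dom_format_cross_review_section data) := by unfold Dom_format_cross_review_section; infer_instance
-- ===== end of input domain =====

-- B builds one flat (agent value, severity)-keyed index of formatted lines in a single pass over the
-- findings, replacing A's per-agent/per-severity rescans of the whole list; same output, no speed claim proved.

-- shared module constants and the _display helper (identical lines in both Pythons)
def sevOrder : List String := ["critical", "error", "warning", "info", "suggestion"]

def sevEmoji : PySem.Dict String String :=
  PySem.Dict.ofList [("critical", "🔴"), ("error", "🟠"), ("warning", "🟡"), ("info", "🔵"), ("suggestion", "⚪")]

-- str.title, exact for the ASCII strings it is applied to here (cased character = ASCII letter)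
def pvTitle : List Char → Bool → List Char
  | [], _ => []
  | c :: cs, prevCased =>
    (if PySem.Chars.isalpha c then
        (if prevCased then PySem.Chars.lowerChar c else PySem.Chars.upperChar c)
      else c) :: pvTitle cs (PySem.Chars.isalpha c)

def pvDisplay (value : String) : String :=
  String.ofList (pvTitle (PySem.Str.replace value "-" " ").toList false)

-- data.get("phase2_findings", []) — the first line of both Pythons
def pvP2 (data : List (String × List (List (String × String)))) : List (List (String × String)) :=
  (PySem.Dict.mk data).getD "phase2_findings" []

-- the per-finding line: loc = f.get("location") or ""; finding = f.get("finding", ""); "- `loc` — finding" / "- finding"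
def pvLine (f : List (String × String)) : String :=
  let loc := ((PySem.Dict.mk f).get? "location").getD ""
  let finding := (PySem.Dict.mk f).getD "finding" ""
  if loc ≠ "" then "- `" ++ loc ++ "` — " ++ finding else "- " ++ finding

-- the severity header "**{emoji} {_display(sev)}**" (identical f-string in both Pythons)
def pvHdr (sev : String) : String := "**" ++ sevEmoji.getD sev "" ++ " " ++ pvDisplay sev ++ "**"

-- ===== PORT A =====
-- A-side helpers: the seen-set/agents_ordered accumulator and A's two nested loops
def pvSeenStep (acc : List String × PySem.Set String) (f : List (String × String)) :
    List String × PySem.Set String :=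
  let agent := ((PySem.Dict.mk f).get? "agent").getD ""
  if acc.2.contains agent then acc else (acc.1 ++ [agent], acc.2.add agent)

def pvSevLoopA (agent_findings : List (List (String × String))) (lines : List String) (sev : String) :
    List String :=
  let grouped := agent_findings.filter (fun f => (PySem.Dict.mk f).get? "severity" == some sev)
  if grouped = [] then lines
  else (grouped.foldl (fun lines f => lines ++ [pvLine f]) (lines ++ [pvHdr sev])) ++ [""]

def pvAgentLoopA (p2 : List (List (String × String))) (lines : List String) (agent : String) :
    List String :=
  sevOrder.foldl (pvSevLoopA (p2.filter (fun f => (PySem.Dict.mk f).get? "agent" == some agent)))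
    (lines ++ ["### " ++ agent])

def format_cross_review_section (data : List (String × List (List (String × String)))) : String :=
  let p2 := pvP2 data
  if p2 = [] then ""
  else
    let agents_ordered := (p2.foldl pvSeenStep ([], PySem.Set.empty)).1
    PySem.Str.join "\n" (agents_ordered.foldl (pvAgentLoopA p2) ["## Phase 2: Cross-Review Synthesis\n"])

-- ===== PORT B =====
-- B-side helpers: the single-pass (agent value, severity)-keyed index and B's emission loops
def pvValidSev (f : List (String × String)) : Bool :=
  match (PySem.Dict.mk f).get? "severity" with
  | some s => sevEmoji.contains s
  | none => false

def pvPairs (p2 : List (List (String × String))) : List ((Option String × String) × String) :=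
  (p2.filter pvValidSev).map
    (fun f => (((PySem.Dict.mk f).get? "agent", ((PySem.Dict.mk f).get? "severity").getD ""), pvLine f))

def pvGroups (p2 : List (List (String × String))) : PySem.Dict (Option String × String) (List String) :=
  (pvPairs p2).foldl (fun d p => d.modify p.1 [] (· ++ [p.2])) PySem.Dict.empty

def pvSevLoopB (groups : PySem.Dict (Option String × String) (List String)) (agent : String)
    (lines : List String) (sev : String) : List String :=
  let block := groups.getD (some agent, sev) []
  if block = [] then lines else lines ++ [pvHdr sev] ++ block ++ [""]
  -- SEVERITY_EMOJI[sev] inside pvHdr: sev ∈ SEVERITY_ORDER ⊆ emoji keys here, so [] never raises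

def pvAgentLoopB (groups : PySem.Dict (Option String × String) (List String))
    (lines : List String) (agent : String) : List String :=
  sevOrder.foldl (pvSevLoopB groups agent) (lines ++ ["### " ++ agent])

def format_cross_review_section_alt (data : List (String × List (List (String × String)))) : String :=
  let p2 := pvP2 data
  if p2 = [] then ""
  else
    let agents := PySem.List.dedup (p2.map (fun f => ((PySem.Dict.mk f).get? "agent").getD ""))
    PySem.Str.join "\n" (agents.foldl (pvAgentLoopB (pvGroups p2)) ["## Phase 2: Cross-Review Synthesis\n"])

-- ===== PRECONDITION & SPEC =====
def Spec_format_cross_review_section (data : List (String × List (List (String × String)))) (out : String) : Prop := out = format_cross_review_section_alt data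
instance (data : List (String × List (List (String × String)))) (out : String) : Decidable (Spec_format_cross_review_section data out) := by unfold Spec_format_cross_review_section; infer_instance

-- ===== CLAIM (what is proved, stated in full; the proofs are below) =====
def Claim_equal_format_cross_review_section : Prop := ∀ (data : List (String × List (List (String × String)))), Dom_format_cross_review_section data → Spec_format_cross_review_section data (format_cross_review_section data)

-- ===== LEMMAS AND PROOFS =====

-- A's seen/agents_ordered fold keeps list = set, so it is the fold of Set.add
theorem pvSeen_eq_foldl_add (p2 : List (List (String × String))) (s : PySem.Set String) :
    (p2.foldl pvSeenStep (s, s)).1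
      = (p2.map (fun f => ((PySem.Dict.mk f).get? "agent").getD "")).foldl PySem.Set.add s := by
  induction p2 generalizing s with
  | nil => rfl
  | cons f rest ih =>
    simp only [List.foldl_cons, List.map_cons]
    have hstep : pvSeenStep (s, s) f
        = (s.add (((PySem.Dict.mk f).get? "agent").getD ""),
           s.add (((PySem.Dict.mk f).get? "agent").getD "")) := by
      unfold pvSeenStep
      by_cases h : (((PySem.Dict.mk f).get? "agent").getD "") ∈ s
      · rw [PySem.Set.add_of_mem h]
        simp [h]
      · rw [PySem.Set.add_of_not_mem h]
        simp [h]
    rw [hstep, ih]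

-- A's agents_ordered is exactly B's ordered dedup of the display agent names
theorem pvAgents_eq (p2 : List (List (String × String))) :
    (p2.foldl pvSeenStep ([], PySem.Set.empty)).1
      = PySem.List.dedup (p2.map (fun f => ((PySem.Dict.mk f).get? "agent").getD "")) := by
  rw [PySem.List.dedup_eq_ofList, PySem.Set.ofList_eq_foldl]
  exact pvSeen_eq_foldl_add p2 PySem.Set.empty

-- membership in SEVERITY_ORDER implies membership in SEVERITY_EMOJI
theorem pvSev_in_emoji {sev : String} (h : sev ∈ sevOrder) : sevEmoji.contains sev = true := by
  fin_cases h <;> decide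

-- B's index at (some agent, sev) is exactly A's doubly-filtered group, formatted
theorem pvGroups_getD (p2 : List (List (String × String))) (agent sev : String)
    (hsev : sev ∈ sevOrder) :
    (pvGroups p2).getD (some agent, sev) []
      = ((p2.filter (fun f => (PySem.Dict.mk f).get? "agent" == some agent)).filter
          (fun f => (PySem.Dict.mk f).get? "severity" == some sev)).map pvLine := by
  unfold pvGroups pvPairs
  rw [PySem.Dict.getD_foldl_modify_append, PySem.Dict.getD_empty, List.filter_map,
    List.map_map, List.filter_filter, List.filter_filter]
  have hne : sev ≠ "" := by fin_cases hsev <;> decide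
  have hc := pvSev_in_emoji hsev
  show List.map pvLine _ = List.map pvLine _
  apply congrArg
  apply List.filter_congr
  intro f _
  simp only [Function.comp_def]
  rw [Bool.eq_iff_iff]
  unfold pvValidSev
  cases hs : (PySem.Dict.mk f).get? "severity" with
  | none =>
    simp only [Option.getD_none, Bool.and_eq_true, beq_iff_eq, Prod.mk.injEq]
    constructor
    · rintro ⟨⟨-, h2⟩, -⟩; exact absurd h2.symm hne
    · rintro ⟨h2, -⟩; cases h2
  | some s =>
    simp only [Option.getD_some, Bool.and_eq_true, beq_iff_eq, Prod.mk.injEq,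
      Option.some.injEq]
    constructor
    · rintro ⟨⟨h1, rfl⟩, -⟩; exact ⟨rfl, h1⟩
    · rintro ⟨rfl, h1⟩; exact ⟨⟨h1, rfl⟩, hc⟩

-- the two severity loops agree (for severities drawn from SEVERITY_ORDER)
theorem pvSevLoop_eq (p2 : List (List (String × String))) (agent : String) (lines : List String)
    (sev : String) (hsev : sev ∈ sevOrder) :
    pvSevLoopA (p2.filter (fun f => (PySem.Dict.mk f).get? "agent" == some agent)) lines sev
      = pvSevLoopB (pvGroups p2) agent lines sev := by
  unfold pvSevLoopA pvSevLoopB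
  rw [pvGroups_getD p2 agent sev hsev]
  set grouped := (p2.filter (fun f => (PySem.Dict.mk f).get? "agent" == some agent)).filter
      (fun f => (PySem.Dict.mk f).get? "severity" == some sev) with hg
  by_cases h : grouped = []
  · simp [h]
  · have hm : grouped.map pvLine ≠ [] := by simpa using h
    rw [if_neg h, if_neg hm, PySem.List.foldl_append_singleton_eq_map, List.append_assoc,
      List.append_assoc]

-- the two agent loops agree
theorem pvAgentLoop_eq (p2 : List (List (String × String))) :
    pvAgentLoopA p2 = pvAgentLoopB (pvGroups p2) := by
  funext lines agent
  unfold pvAgentLoopA pvAgentLoopB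
  exact PySem.List.foldl_congr_mem _ _ _ _ (fun acc sev hsev => pvSevLoop_eq p2 agent acc sev hsev)

-- ===== VERDICT (by name: the statement is the Claim_ definition above) =====
theorem format_cross_review_section_spec : Claim_equal_format_cross_review_section := by
  intro data _
  unfold Spec_format_cross_review_section format_cross_review_section format_cross_review_section_alt
  by_cases h : pvP2 data = []
  · simp [h]
  · simp only [h, if_false]
    rw [pvAgents_eq, pvAgentLoop_eq]
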